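-- pv_equiv track=rewrite | github.com/hitz-zentroa/GoLLIE | src/tasks/label_encoding.py | to_bilou_encoding
-- ===== SOURCE A (Python) =====
-- from typing import List
--
-- def to_bilou_encoding(tags: List[str]) -> List[str]:
--     # From IOB or IOB2
--
--     prev_word_tag_tmp: str = ""
--     for i in range(len(tags)):
--         tag = tags[i]
--         if tag == "O":
--             if prev_word_tag_tmp != "":
--                 try:
--                     prev_b, prev_t = prev_word_tag_tmp.split("-")
--                 except ValueError:
--                     raise ValueError(f"Error in tag {prev_word_tag_tmp}, unable to split the tag in 2 fields.")
--
--                 if prev_b == "B":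
--                     tags[i - 1] = f"U-{prev_t}"
--                 else:
--                     tags[i - 1] = f"L-{prev_t}"
--
--             prev_word_tag_tmp: str = ""
--
--         else:
--             try:
--                 b, t = tag.split("-")
--             except ValueError:
--                 raise ValueError(f"Error in tag {prev_word_tag_tmp}, unable to split the tag in 2 fields.")
--
--             if prev_word_tag_tmp == "":
--                 if b == "U":
--                     prev_word_tag_tmp = ""
--                 else:
--                     prev_word_tag_tmp = f"B-{t}"
--
--             else:
--                 try:
--                     prev_b, prev_t = prev_word_tag_tmp.split("-")
--                 except ValueError:
--                     raise ValueError(f"Error in tag {prev_word_tag_tmp}, unable to split the tag in 2 fields.")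
--
--                 if b == "U":
--                     if prev_b == "B":
--                         tags[i - 1] = f"U-{prev_t}"
--                     else:
--                         tags[i - 1] = f"L-{prev_t}"
--
--                     prev_word_tag_tmp = ""
--
--                 elif b == "B":
--                     if prev_b == "B":
--                         tags[i - 1] = f"U-{prev_t}"
--                     else:
--                         tags[i - 1] = f"L-{prev_t}"
--
--                     prev_word_tag_tmp = f"B-{t}"
--
--                 else:
--                     if prev_t != t:
--                         if prev_b == "B":
--                             tags[i - 1] = f"U-{prev_t}"
--                         else:
--                             tags[i - 1] = f"L-{prev_t}"
--
--                         prev_word_tag_tmp = f"B-{t}"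
--                     else:
--                         if prev_b == "B":
--                             tags[i - 1] = f"B-{prev_t}"
--                         else:
--                             tags[i - 1] = f"I-{prev_t}"
--
--                         prev_word_tag_tmp = f"I-{t}"
--
--     if prev_word_tag_tmp != "":
--         try:
--             prev_b, prev_t = prev_word_tag_tmp.split("-")
--         except ValueError:
--             raise ValueError(f"Error in tag {prev_word_tag_tmp}, unable to split the tag in 2 fields.")
--
--         if prev_b == "B":
--             tags[-1] = f"U-{prev_t}"
--         else:
--             tags[-1] = f"L-{prev_t}"
--
--     return tags
-- ===== SOURCE B (Python) =====
-- from typing import List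
--
--
-- def to_bilou_encoding(tags: List[str]) -> List[str]:
--     # Two-pass re-implementation: segment into maximal entity runs, then relabel
--     # each run as U (length 1) or B/I.../L; 'O' and input 'U-' tags pass through.
--     # Mutates `tags` in place (like the original) and returns it.
--     out: List[str] = []
--     cur = None  # open run: (entity type, length)
--
--     def close():
--         nonlocal cur
--         if cur is not None:
--             t, n = cur
--             if n == 1:
--                 out.append(f"U-{t}")
--             else:
--                 out.append(f"B-{t}")
--                 out.extend([f"I-{t}"] * (n - 2))
--                 out.append(f"L-{t}")
--             cur = None
--
--     for tag in tags:
--         if tag == "O":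
--             close()
--             out.append("O")
--         else:
--             parts = tag.split("-")
--             if len(parts) != 2:
--                 raise ValueError(f"Error in tag {tag}, unable to split the tag in 2 fields.")
--             b, t = parts
--             if b == "U":
--                 close()
--                 out.append(tag)
--             elif cur is not None and b != "B" and cur[0] == t:
--                 cur = (t, cur[1] + 1)
--             else:
--                 close()
--                 cur = (t, 1)
--
--     close()
--     tags[:] = out
--     return tags
-- ===== Notes on version B (the rewrite author's own statement) =====
-- stated objective: alternative
-- what changed: B replaces A's single pass that patches tags[i-1] in place via a prev-tag string with a two-phase build: it segments the input into maximal entity runs (type, length) and renders each finished run as U or B/I.../L into a fresh output list, then writes it back with tags[:] = out.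
import Mathlib
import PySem

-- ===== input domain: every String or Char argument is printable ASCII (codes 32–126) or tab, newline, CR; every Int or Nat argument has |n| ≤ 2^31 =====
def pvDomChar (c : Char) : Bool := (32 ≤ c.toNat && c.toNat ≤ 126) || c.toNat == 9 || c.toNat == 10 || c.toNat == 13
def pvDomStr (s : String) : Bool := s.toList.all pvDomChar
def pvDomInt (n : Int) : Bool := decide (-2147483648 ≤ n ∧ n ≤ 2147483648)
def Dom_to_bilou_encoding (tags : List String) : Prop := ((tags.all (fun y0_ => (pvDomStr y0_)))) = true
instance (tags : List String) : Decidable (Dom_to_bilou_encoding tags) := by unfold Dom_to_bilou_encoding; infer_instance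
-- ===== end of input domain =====

-- B rebuilds the sequence in two conceptual passes (segment into maximal entity runs, then
-- render each run) instead of A's single pass that patches tags[i-1] in place; same results.
-- Python A and Python B both mutate the argument list in place; the equivalence proved here
-- is about the RETURN value (which is that same list).

-- ===== PORT A =====

-- tag.split("-") unpacked into exactly two fields; `none` is Python's ValueError
-- (those inputs are excluded by Pre_). Used by both ports (both Pythons split the same way).
def splitTag (s : String) : Option (String × String) :=
  match PySem.Str.split? s "-" with
  | some [b, t] => some (b, t)
  | _ => none

-- one iteration of A's `for i in range(len(tags))` loop; state = (tags, prev_word_tag_tmp).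
-- `ts.getD i ""` is tags[i] (i is always in range); `ts.set (i-1) v` is `tags[i-1] = v`
-- (a rewrite only ever happens with i ≥ 1, since prev is "" at i = 0).
def stepA (st : List String × String) (i : Nat) : List String × String :=
  let ts := st.1
  let prev := st.2
  let tag := ts.getD i ""
  if tag = "O" then
    if prev ≠ "" then
      match splitTag prev with
      | some (pb, pt) => (ts.set (i - 1) (if pb = "B" then "U-" ++ pt else "L-" ++ pt), "")
      | none => (ts, "")                 -- raise ValueError (unreachable: prev always splits)
    else (ts, "")
  else
    match splitTag tag with
    | none => (ts, prev)                 -- raise ValueError: excluded by Pre_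
    | some (b, t) =>
      if prev = "" then
        (ts, if b = "U" then "" else "B-" ++ t)
      else
        match splitTag prev with
        | none => (ts, prev)             -- raise ValueError (unreachable: prev always splits)
        | some (pb, pt) =>
          if b = "U" then
            (ts.set (i - 1) (if pb = "B" then "U-" ++ pt else "L-" ++ pt), "")
          else if b = "B" then
            (ts.set (i - 1) (if pb = "B" then "U-" ++ pt else "L-" ++ pt), "B-" ++ t)
          else if pt ≠ t then
            (ts.set (i - 1) (if pb = "B" then "U-" ++ pt else "L-" ++ pt), "B-" ++ t)
          else
            (ts.set (i - 1) (if pb = "B" then "B-" ++ pt else "I-" ++ pt), "I-" ++ t)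

-- A's code after the loop: `if prev != "": tags[-1] = ...` (tags is nonempty there, so
-- tags[-1] is index len-1).
def finishA (st : List String × String) : List String :=
  if st.2 ≠ "" then
    match splitTag st.2 with
    | some (pb, pt) => st.1.set (st.1.length - 1) (if pb = "B" then "U-" ++ pt else "L-" ++ pt)
    | none => st.1                       -- raise ValueError (unreachable: prev always splits)
  else st.1

def to_bilou_encoding (tags : List String) : List String :=
  finishA ((List.range tags.length).foldl stepA (tags, ""))

-- ===== PORT B =====

-- B's close(): render a finished run (t, n) as U-t (n = 1) or B-t, I-t…, L-t.
def closeSpan (cur : Option (String × Nat)) : List String :=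
  match cur with
  | none => []
  | some (t, n) =>
    if n = 1 then ["U-" ++ t]
    else ("B-" ++ t) :: (List.replicate (n - 2) ("I-" ++ t) ++ ["L-" ++ t])

-- one iteration of B's `for tag in tags`; state = (out, cur).
def stepB (st : List String × Option (String × Nat)) (tag : String) : List String × Option (String × Nat) :=
  let out := st.1
  let cur := st.2
  if tag = "O" then (out ++ closeSpan cur ++ ["O"], none)
  else
    match splitTag tag with
    | none => (out, cur)                 -- raise ValueError: excluded by Pre_
    | some (b, t) =>
      if b = "U" then (out ++ closeSpan cur ++ [tag], none)
      else
        match cur with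
        | some (ct, n) =>
          if b ≠ "B" ∧ ct = t then (out, some (ct, n + 1))
          else (out ++ closeSpan cur, some (t, 1))
        | none => (out ++ closeSpan cur, some (t, 1))

def to_bilou_encoding_alt (tags : List String) : List String :=
  let st := tags.foldl stepB ([], none)
  st.1 ++ closeSpan st.2

-- ===== PRECONDITION & SPEC =====
-- Pre_ excludes exactly the inputs on which A raises ValueError: a non-"O" tag whose split
-- on "-" does not give exactly 2 fields (i.e. not exactly one '-' in the tag). B raises there too.
def Pre_to_bilou_encoding (tags : List String) : Prop :=
  ∀ s ∈ tags, s = "O" ∨ s.toList.count '-' = 1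
instance (tags : List String) : Decidable (Pre_to_bilou_encoding tags) := by
  unfold Pre_to_bilou_encoding; infer_instance

def pvWitness_to_bilou_encoding : List String := ["B-per", "I-per", "O", "U-loc", "I-org"]

def Spec_to_bilou_encoding (tags : List String) (out : List String) : Prop := out = to_bilou_encoding_alt tags
instance (tags : List String) (out : List String) : Decidable (Spec_to_bilou_encoding tags out) := by unfold Spec_to_bilou_encoding; infer_instance

-- ===== CLAIM (what is proved, stated in full; the proofs are below) =====
def Claim_equal_to_bilou_encoding : Prop := ∀ (tags : List String), Dom_to_bilou_encoding tags → Pre_to_bilou_encoding tags → Spec_to_bilou_encoding tags (to_bilou_encoding tags)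

-- ===== LEMMAS AND PROOFS =====

-- The prefix of an open run of length n as it already stands rewritten in A's list:
-- positions before the last one read B-t, I-t, …, I-t.
def pfx (t : String) (n : Nat) : List String :=
  if n = 1 then [] else ("B-" ++ t) :: List.replicate (n - 2) ("I-" ++ t)

def pfxL : Option (String × Nat) → List String
  | none => []
  | some (t, n) => pfx t n

-- A's prev_word_tag_tmp corresponding to B's cur.
def encode : Option (String × Nat) → String
  | none => ""
  | some (t, n) => if n = 1 then "B-" ++ t else "I-" ++ t

-- shape invariant for B's cur and the single not-yet-rewritten cell L of A's list
def SpanOK : Option (String × Nat) → List String → Prop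
  | none, L => L = []
  | some (t, n), L => 1 ≤ n ∧ '-' ∉ t.toList ∧ ∃ l, L = [l]

-- ---- facts about Python's split on "-" ----

theorem go_no_sep (fuel : Nat) (cs cur : List Char) (acc : List (List Char))
    (h : '-' ∉ cs) :
    PySem.Chars.splitOn.go ['-'] fuel cs cur acc = acc.reverse ++ [cur.reverse ++ cs] := by
  induction fuel generalizing cs cur acc with
  | zero => simp [PySem.Chars.splitOn.go]
  | succ f ih =>
    cases cs with
    | nil => simp [PySem.Chars.splitOn.go]
    | cons c rest =>
      have hc : c ≠ '-' := fun hc => h (hc ▸ List.mem_cons_self)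
      have hpre : List.isPrefixOf ['-'] (c :: rest) = false := by
        simp [List.isPrefixOf]; exact fun hh => hc hh.symm
      have hrest : '-' ∉ rest := fun hm => h (List.mem_cons_of_mem _ hm)
      simp [PySem.Chars.splitOn.go, hpre, ih rest (c :: cur) acc hrest]

theorem go_two (bcs : List Char) : ∀ (fuel : Nat) (tcs cur : List Char) (acc : List (List Char)),
    '-' ∉ bcs → '-' ∉ tcs → bcs.length + 1 ≤ fuel →
    PySem.Chars.splitOn.go ['-'] fuel (bcs ++ '-' :: tcs) cur acc
      = acc.reverse ++ [cur.reverse ++ bcs, tcs] := by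
  induction bcs with
  | nil =>
    intro fuel tcs cur acc _ ht hf
    obtain ⟨f, rfl⟩ : ∃ f, fuel = f + 1 := ⟨fuel - 1, by omega⟩
    have hpre : List.isPrefixOf ['-'] ('-' :: tcs) = true := by simp [List.isPrefixOf]
    simp [PySem.Chars.splitOn.go, hpre, go_no_sep f tcs [] (cur.reverse :: acc) ht]
  | cons c bcs ih =>
    intro fuel tcs cur acc hb ht hf
    obtain ⟨f, rfl⟩ : ∃ f, fuel = f + 1 := ⟨fuel - 1, by omega⟩
    have hc : c ≠ '-' := fun hc => hb (hc ▸ List.mem_cons_self)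
    have hpre : List.isPrefixOf ['-'] (c :: (bcs ++ '-' :: tcs)) = false := by
      simp [List.isPrefixOf]; exact fun hh => hc hh.symm
    have hb' : '-' ∉ bcs := fun hm => hb (List.mem_cons_of_mem _ hm)
    have := ih f tcs (c :: cur) acc hb' ht (by simpa using Nat.succ_le_succ_iff.mp hf)
    simpa [PySem.Chars.splitOn.go, hpre] using this

theorem splitOn_two (bcs tcs : List Char) (hb : '-' ∉ bcs) (ht : '-' ∉ tcs) :
    PySem.Chars.splitOn (bcs ++ '-' :: tcs) ['-'] = [bcs, tcs] := by
  unfold PySem.Chars.splitOn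
  rw [go_two bcs _ tcs [] [] hb ht (by simp)]
  simp

theorem splitTag_of_toList (s : String) (bcs tcs : List Char)
    (h : s.toList = bcs ++ '-' :: tcs) (hb : '-' ∉ bcs) (ht : '-' ∉ tcs) :
    splitTag s = some (String.ofList bcs, String.ofList tcs) := by
  have hsep : ("-" : String).toList = ['-'] := by decide
  unfold splitTag PySem.Str.split?
  rw [h, hsep]
  unfold PySem.Chars.split?
  simp [splitOn_two bcs tcs hb ht]

theorem count_one_decomp (cs : List Char) (h : cs.count '-' = 1) :
    ∃ bcs tcs, cs = bcs ++ '-' :: tcs ∧ '-' ∉ bcs ∧ '-' ∉ tcs := by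
  induction cs with
  | nil => simp at h
  | cons c rest ih =>
    by_cases hc : c = '-'
    · subst hc
      have h0 : rest.count '-' = 0 := by simpa using h
      exact ⟨[], rest, by simp, by simp, List.count_eq_zero.mp h0⟩
    · have h1 : rest.count '-' = 1 := by
        rw [List.count_cons, if_neg (show ¬ ((c == '-') = true) by simp [hc])] at h
        simpa using h
      obtain ⟨b, t, hdec, hb, ht⟩ := ih h1
      refine ⟨c :: b, t, by simp [hdec], ?_, ht⟩
      simp [hb]; exact fun hh => hc hh.symm

theorem encode_toList (t : String) (n : Nat) :
    (encode (some (t, n))).toList = (if n = 1 then 'B' else 'I') :: '-' :: t.toList := by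
  have hB : ("B-" : String).toList = ['B', '-'] := by decide
  have hI : ("I-" : String).toList = ['I', '-'] := by decide
  by_cases h : n = 1 <;> simp [encode, h, String.toList_append, hB, hI]

theorem encode_ne (t : String) (n : Nat) : encode (some (t, n)) ≠ "" := by
  intro h
  have := congrArg String.toList h
  rw [encode_toList] at this
  simp at this

theorem splitTag_encode (t : String) (n : Nat) (ht : '-' ∉ t.toList) :
    splitTag (encode (some (t, n))) = some (if n = 1 then "B" else "I", t) := by
  have h := splitTag_of_toList (encode (some (t, n))) [if n = 1 then 'B' else 'I'] t.toList
    (by rw [encode_toList]; simp) (by by_cases h : n = 1 <;> simp [h]) ht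
  rw [h, String.ofList_toList]
  by_cases h1 : n = 1 <;> simp [h1]

theorem closeSpan_decomp (t : String) (n : Nat) (_hn : 1 ≤ n) :
    closeSpan (some (t, n)) = pfx t n ++ [if n = 1 then "U-" ++ t else "L-" ++ t] := by
  by_cases h : n = 1 <;> simp [closeSpan, pfx, h]

theorem pfx_succ (t : String) (n : Nat) (hn : 1 ≤ n) :
    pfx t (n + 1) = pfx t n ++ [if n = 1 then "B-" ++ t else "I-" ++ t] := by
  by_cases h : n = 1
  · simp [pfx, h]
  · have h2 : 2 ≤ n := by omega
    simp only [pfx, if_neg h, if_neg (by omega : ¬ n + 1 = 1)]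
    have : n + 1 - 2 = (n - 2) + 1 := by omega
    simp [this, List.replicate_succ']

theorem if_BI_close (t : String) (n : Nat) :
    (if (if n = 1 then "B" else "I") = "B" then "U-" ++ t else "L-" ++ t)
      = (if n = 1 then "U-" ++ t else "L-" ++ t) := by
  by_cases h : n = 1 <;> simp [h]

theorem if_BI_cont (t : String) (n : Nat) :
    (if (if n = 1 then "B" else "I") = "B" then "B-" ++ t else "I-" ++ t)
      = (if n = 1 then "B-" ++ t else "I-" ++ t) := by
  by_cases h : n = 1 <;> simp [h]

-- the main loop invariant: A's list is  out ++ pfxL cur ++ L ++ rest  where `out` is B's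
-- accumulated output, pfxL cur the already-rewritten prefix of the open run, L its last
-- (not yet rewritten) cell, and rest the unread original tags; the loop index sits at |out ++ pfxL cur ++ L|.
theorem loop_main (rest : List String) :
    ∀ (out L : List String) (cur : Option (String × Nat)),
    SpanOK cur L →
    (∀ s ∈ rest, s = "O" ∨ s.toList.count '-' = 1) →
    finishA ((List.range' (out ++ pfxL cur ++ L).length rest.length).foldl stepA
        (out ++ pfxL cur ++ L ++ rest, encode cur))
      = (rest.foldl stepB (out, cur)).1 ++ closeSpan (rest.foldl stepB (out, cur)).2 := by
  induction rest with
  | nil =>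
    intro out L cur hok _
    cases cur with
    | none =>
      simp [SpanOK] at hok; subst hok
      simp [pfxL, encode, finishA, closeSpan]
    | some p =>
      obtain ⟨t, n⟩ := p
      obtain ⟨hn, ht, l, rfl⟩ := hok
      simp only [List.length_nil, List.range', List.foldl_nil, List.append_nil]
      rw [finishA]
      simp only [if_pos (encode_ne t n), splitTag_encode t n ht]
      rw [closeSpan_decomp t n hn, if_BI_close]
      have hlen : (out ++ pfxL (some (t, n)) ++ [l]).length - 1 = (out ++ pfxL (some (t, n))).length := by
        simp
      rw [hlen, show out ++ pfxL (some (t, n)) ++ [l] = (out ++ pfxL (some (t, n))) ++ [l] ++ [] by simp]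
      simp [pfxL]
  | cons tag rest ih =>
    intro out L cur hok hpre
    have hpre' : ∀ s ∈ rest, s = "O" ∨ s.toList.count '-' = 1 :=
      fun s hs => hpre s (List.mem_cons_of_mem _ hs)
    have htag := hpre tag List.mem_cons_self
    rw [List.length_cons, List.range'_succ, List.foldl_cons]
    have hget : (out ++ pfxL cur ++ L ++ tag :: rest).getD (out ++ pfxL cur ++ L).length "" = tag := by
      rw [show out ++ pfxL cur ++ L ++ tag :: rest = (out ++ pfxL cur ++ L) ++ tag :: rest by simp]
      simp
    cases cur with
    | none =>
      simp only [SpanOK] at hok; subst hok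
      rcases htag with hO | hcount
      · -- tag = "O", no open run
        subst hO
        simp only [show stepA (out ++ pfxL none ++ [] ++ "O" :: rest, encode none)
              ((out ++ pfxL none ++ []).length)
            = ((out ++ ["O"]) ++ pfxL none ++ [] ++ rest, encode none) by
          simp [stepA, encode, pfxL]]
        simp only [show ((out ++ pfxL none ++ []).length) + 1 = ((out ++ ["O"]) ++ pfxL none ++ []).length by
          simp [pfxL]]
        rw [ih (out ++ ["O"]) [] none (by simp [SpanOK]) hpre']
        simp [stepB, closeSpan]
      · obtain ⟨bcs, tcs, hdec, hb, htc⟩ := count_one_decomp tag.toList hcount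
        have hsplit := splitTag_of_toList tag bcs tcs hdec hb htc
        have htagO : tag ≠ "O" := by
          intro h; subst h; exact absurd hcount (by decide)
        by_cases hU : String.ofList bcs = "U"
        · -- standalone U- tag: pass through
          simp only [show stepA (out ++ pfxL none ++ [] ++ tag :: rest, encode none)
                ((out ++ pfxL none ++ []).length)
              = ((out ++ [tag]) ++ pfxL none ++ [] ++ rest, encode none) by
            simp [stepA, encode, pfxL, hsplit, htagO, hU]]
          simp only [show ((out ++ pfxL none ++ []).length) + 1 = ((out ++ [tag]) ++ pfxL none ++ []).length by
            simp [pfxL]]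
          rw [ih (out ++ [tag]) [] none (by simp [SpanOK]) hpre']
          simp [stepB, closeSpan, htagO, hsplit, hU]
        · -- open a new run of length 1
          have htc' : '-' ∉ (String.ofList tcs).toList := by rw [String.toList_ofList]; exact htc
          simp only [show stepA (out ++ pfxL none ++ [] ++ tag :: rest, encode none)
                ((out ++ pfxL none ++ []).length)
              = (out ++ pfxL (some (String.ofList tcs, 1)) ++ [tag] ++ rest,
                 encode (some (String.ofList tcs, 1))) by
            simp [stepA, encode, pfxL, pfx, hsplit, htagO, hU]]
          simp only [show ((out ++ pfxL none ++ []).length) + 1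
              = (out ++ pfxL (some (String.ofList tcs, 1)) ++ [tag]).length by
            simp [pfxL, pfx]]
          rw [ih out [tag] (some (String.ofList tcs, 1))
            (by exact ⟨le_refl 1, htc', tag, rfl⟩) hpre']
          simp [stepB, closeSpan, htagO, hsplit, hU]
    | some p =>
      obtain ⟨ct, n⟩ := p
      obtain ⟨hn, hct, l, rfl⟩ := hok
      have hprev : encode (some (ct, n)) ≠ "" := encode_ne ct n
      have hpsplit := splitTag_encode ct n hct
      have hshape : out ++ pfxL (some (ct, n)) ++ [l] ++ tag :: rest
          = (out ++ pfxL (some (ct, n))) ++ [l] ++ tag :: rest := by simp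
      have hidx : (out ++ pfxL (some (ct, n)) ++ [l]).length - 1
          = (out ++ pfxL (some (ct, n))).length := by simp
      have hset : ∀ v : String, (out ++ pfxL (some (ct, n)) ++ [l] ++ tag :: rest).set
            ((out ++ pfxL (some (ct, n)) ++ [l]).length - 1) v
          = (out ++ pfxL (some (ct, n))) ++ [v] ++ tag :: rest := by
        intro v
        rw [hshape, hidx, show (out ++ pfxL (some (ct, n))) ++ [l] ++ tag :: rest
            = (out ++ pfxL (some (ct, n))) ++ l :: (tag :: rest) by simp]
        simp
      have hcloseeq : (out ++ pfxL (some (ct, n))) ++ [if n = 1 then "U-" ++ ct else "L-" ++ ct]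
          = out ++ closeSpan (some (ct, n)) := by
        rw [closeSpan_decomp ct n hn]; simp [pfxL]
      rcases htag with hO | hcount
      · -- tag = "O": close the open run
        subst hO
        simp only [show stepA (out ++ pfxL (some (ct, n)) ++ [l] ++ "O" :: rest, encode (some (ct, n)))
              ((out ++ pfxL (some (ct, n)) ++ [l]).length)
            = (((out ++ closeSpan (some (ct, n))) ++ ["O"]) ++ pfxL none ++ [] ++ rest, encode none) by
          simp only [stepA, hget, if_pos hprev, hpsplit, if_BI_close]
          rw [hset, ← hcloseeq]
          simp [pfxL, encode]]
        simp only [show ((out ++ pfxL (some (ct, n)) ++ [l]).length) + 1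
            = (((out ++ closeSpan (some (ct, n))) ++ ["O"]) ++ pfxL none ++ []).length by
          rw [closeSpan_decomp ct n hn]; simp [pfxL] <;> omega]
        rw [ih ((out ++ closeSpan (some (ct, n))) ++ ["O"]) [] none (by simp [SpanOK]) hpre']
        simp [stepB]
      · obtain ⟨bcs, tcs, hdec, hb, htc⟩ := count_one_decomp tag.toList hcount
        have hsplit := splitTag_of_toList tag bcs tcs hdec hb htc
        have htagO : tag ≠ "O" := by
          intro h; subst h; exact absurd hcount (by decide)
        have htc' : '-' ∉ (String.ofList tcs).toList := by rw [String.toList_ofList]; exact htc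
        by_cases hU : String.ofList bcs = "U"
        · -- U- tag: close the run, pass the tag through
          simp only [show stepA (out ++ pfxL (some (ct, n)) ++ [l] ++ tag :: rest, encode (some (ct, n)))
                ((out ++ pfxL (some (ct, n)) ++ [l]).length)
              = (((out ++ closeSpan (some (ct, n))) ++ [tag]) ++ pfxL none ++ [] ++ rest, encode none) by
            simp only [stepA, hget, if_neg (by simpa using htagO), hsplit, if_neg (by simpa using hprev),
              hpsplit, if_pos hU, if_BI_close]
            rw [hset, ← hcloseeq]
            simp [pfxL, encode]]
          simp only [show ((out ++ pfxL (some (ct, n)) ++ [l]).length) + 1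
              = (((out ++ closeSpan (some (ct, n))) ++ [tag]) ++ pfxL none ++ []).length by
            rw [closeSpan_decomp ct n hn]; simp [pfxL] <;> omega]
          rw [ih ((out ++ closeSpan (some (ct, n))) ++ [tag]) [] none (by simp [SpanOK]) hpre']
          simp [stepB, htagO, hsplit, hU]
        · by_cases hB : String.ofList bcs = "B"
          · -- B- tag: close the run, open a new one
            simp only [show stepA (out ++ pfxL (some (ct, n)) ++ [l] ++ tag :: rest, encode (some (ct, n)))
                  ((out ++ pfxL (some (ct, n)) ++ [l]).length)
                = ((out ++ closeSpan (some (ct, n))) ++ pfxL (some (String.ofList tcs, 1)) ++ [tag] ++ rest,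
                   encode (some (String.ofList tcs, 1))) by
              simp only [stepA, hget, if_neg (by simpa using htagO), hsplit, if_neg (by simpa using hprev),
                hpsplit, if_neg hU, if_pos hB, if_BI_close]
              rw [hset, ← hcloseeq]
              simp [pfxL, pfx, encode]]
            simp only [show ((out ++ pfxL (some (ct, n)) ++ [l]).length) + 1
                = ((out ++ closeSpan (some (ct, n))) ++ pfxL (some (String.ofList tcs, 1)) ++ [tag]).length by
              rw [closeSpan_decomp ct n hn]; simp [pfxL, pfx] <;> omega]
            rw [ih (out ++ closeSpan (some (ct, n))) [tag] (some (String.ofList tcs, 1))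
              ⟨le_refl 1, htc', tag, rfl⟩ hpre']
            simp [stepB, htagO, hsplit, hU, hB]
          · by_cases hT : ct = String.ofList tcs
            · -- continuation: same type, extend the run
              rw [← hT] at hsplit
              have hne1 : ¬ (n + 1 = 1) := by omega
              have hne0 : ¬ (n = 0) := by omega
              simp only [show stepA (out ++ pfxL (some (ct, n)) ++ [l] ++ tag :: rest, encode (some (ct, n)))
                    ((out ++ pfxL (some (ct, n)) ++ [l]).length)
                  = (out ++ pfxL (some (ct, n + 1)) ++ [tag] ++ rest, encode (some (ct, n + 1))) by
                simp only [stepA, hget, if_neg (by simpa using htagO), hsplit,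
                  if_neg (by simpa using hprev), hpsplit, if_neg hU, if_neg hB,
                  if_neg (show ¬ (ct ≠ ct) from fun h => h rfl), if_BI_cont]
                rw [hset]
                rw [show pfxL (some (ct, n + 1)) = pfxL (some (ct, n)) ++ [(if n = 1 then "B-" ++ ct else "I-" ++ ct)] by simpa [pfxL] using pfx_succ ct n hn]
                simp [encode, hne0]]
              simp only [show ((out ++ pfxL (some (ct, n)) ++ [l]).length) + 1
                  = (out ++ pfxL (some (ct, n + 1)) ++ [tag]).length by
                rw [show pfxL (some (ct, n + 1)) = pfxL (some (ct, n)) ++ [(if n = 1 then "B-" ++ ct else "I-" ++ ct)] by simpa [pfxL] using pfx_succ ct n hn]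
                simp <;> omega]
              rw [ih out [tag] (some (ct, n + 1)) ⟨by omega, hct, tag, rfl⟩ hpre']
              simp [stepB, htagO, hsplit, hU, hB]
            · -- different type: close the run, open a new one
              simp only [show stepA (out ++ pfxL (some (ct, n)) ++ [l] ++ tag :: rest, encode (some (ct, n)))
                    ((out ++ pfxL (some (ct, n)) ++ [l]).length)
                  = ((out ++ closeSpan (some (ct, n))) ++ pfxL (some (String.ofList tcs, 1)) ++ [tag] ++ rest,
                     encode (some (String.ofList tcs, 1))) by
                simp only [stepA, hget, if_neg (by simpa using htagO), hsplit,
                  if_neg (by simpa using hprev), hpsplit, if_neg hU, if_neg hB, if_pos hT, if_BI_close]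
                rw [hset, ← hcloseeq]
                simp [pfxL, pfx, encode]]
              simp only [show ((out ++ pfxL (some (ct, n)) ++ [l]).length) + 1
                  = ((out ++ closeSpan (some (ct, n))) ++ pfxL (some (String.ofList tcs, 1)) ++ [tag]).length by
                rw [closeSpan_decomp ct n hn]; simp [pfxL, pfx] <;> omega]
              rw [ih (out ++ closeSpan (some (ct, n))) [tag] (some (String.ofList tcs, 1))
                ⟨le_refl 1, htc', tag, rfl⟩ hpre']
              simp [stepB, htagO, hsplit, hU, hB, hT]

-- ===== VERDICT (by name: the statement is the Claim_ definition above) =====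
theorem to_bilou_encoding_spec : Claim_equal_to_bilou_encoding := by
  intro tags _ hpre
  unfold Spec_to_bilou_encoding to_bilou_encoding to_bilou_encoding_alt
  have := loop_main tags [] [] none (by simp [SpanOK]) hpre
  simpa [pfxL, encode, List.range_eq_range'] using this
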